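-- pv_equiv track=rewrite | github.com/FreeFlowVFX/ComfyUi-FreeFlowGS | nodes/FreeFlow_SmartGridMonitor.py | _parse_frames
-- ===== SOURCE A (Python) =====
-- def _parse_frames(frame_str, available_frames):
--     """Parse frame selection using Real Frame Numbers."""
--     frame_str = str(frame_str).lower().strip()
--     max_idx = len(available_frames)
--
--     if frame_str == "*" or frame_str == "all":
--         return list(range(max_idx))
--
--     indices = set()
--     parts = frame_str.split(',')
--
--     desired_frames = set()
--     ranges = []
--
--     for part in parts:
--         part = part.strip()
--         if not part: continue
--         if '-' in part:
--              try:
--                 s, e = map(int, part.split('-'))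
--                 ranges.append((s, e))
--              except: pass
--         else:
--              try:
--                 desired_frames.add(int(part))
--              except: pass
--
--     final_indices = []
--     for idx, frame_num in enumerate(available_frames):
--         match = False
--         if frame_num in desired_frames:
--             match = True
--         else:
--             for (s, e) in ranges:
--                 if s <= frame_num <= e:
--                     match = True
--                     break
--         if match:
--             final_indices.append(idx)
--
--     return sorted(final_indices)
-- ===== SOURCE B (Python) =====
-- import bisect
--
-- def _parse_frames(frame_str, available_frames):
--     """Parse frame selection: merge intervals once, then binary-search per frame."""
--     frame_str = str(frame_str).lower().strip()
--     n = len(available_frames)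
--
--     if frame_str == "*" or frame_str == "all":
--         return list(range(n))
--
--     # Collect every selector as an interval (a single number v becomes (v, v)).
--     intervals = []
--     for part in frame_str.split(','):
--         part = part.strip()
--         if not part:
--             continue
--         if '-' in part:
--             pieces = part.split('-')
--             if len(pieces) == 2:
--                 try:
--                     intervals.append((int(pieces[0]), int(pieces[1])))
--                 except ValueError:
--                     pass
--         else:
--             try:
--                 v = int(part)
--                 intervals.append((v, v))
--             except ValueError:
--                 pass
--
--     # Sort by start and merge into a start-ordered, gap-separated interval list.
--     intervals.sort(key=lambda p: p[0])
--     merged = []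
--     cur = None
--     for s, e in intervals:
--         if cur is not None and s <= cur[1]:
--             if e > cur[1]:
--                 cur = (cur[0], e)
--         else:
--             if cur is not None:
--                 merged.append(cur)
--             cur = (s, e)
--     if cur is not None:
--         merged.append(cur)
--
--     starts = [s for s, _ in merged]
--     out = []
--     for i, v in enumerate(available_frames):
--         k = bisect.bisect_right(starts, v)
--         if k > 0 and v <= merged[k - 1][1]:
--             out.append(i)
--     return out
-- ===== Notes on version B (the rewrite author's own statement) =====
-- stated objective: alternative
-- what changed: A scans the whole ranges list for every frame; B converts all selectors (numbers and ranges) to intervals once, sorts and merges them into disjoint start-ordered intervals, and decides each frame with one bisect_right binary search, also dropping A's final redundant sort.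
import Mathlib
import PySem

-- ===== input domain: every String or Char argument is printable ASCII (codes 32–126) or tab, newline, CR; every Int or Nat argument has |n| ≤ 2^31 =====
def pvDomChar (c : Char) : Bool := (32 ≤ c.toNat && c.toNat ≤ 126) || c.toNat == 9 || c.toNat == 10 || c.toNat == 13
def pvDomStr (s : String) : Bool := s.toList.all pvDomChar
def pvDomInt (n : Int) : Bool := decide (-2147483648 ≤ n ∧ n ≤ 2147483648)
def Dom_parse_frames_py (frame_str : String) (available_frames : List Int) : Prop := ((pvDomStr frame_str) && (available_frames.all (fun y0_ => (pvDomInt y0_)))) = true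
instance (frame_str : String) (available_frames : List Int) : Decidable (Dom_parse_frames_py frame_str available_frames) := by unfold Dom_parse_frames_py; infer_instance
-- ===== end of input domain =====

-- B replaces A's per-frame linear scan of all ranges by one sort/merge of the selectors into
-- disjoint intervals followed by a binary search per frame (objective: alternative algorithm;
-- a timing run did not confirm a measurable speed-up on the generated inputs).

-- ===== PORT A =====
-- one part of the comma-split string, acting on A's state (desired_frames set, ranges list);
-- 's, e = map(int, part.split('-'))' succeeds exactly when the split has two int-parsable pieces
-- (any failure lands in the bare 'except: pass'); split? is 'some' since the separator "-" is nonempty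
def pvAStep (st : PySem.Set Int × List (Int × Int)) (part0 : String) : PySem.Set Int × List (Int × Int) :=
  if PySem.Str.strip part0 = "" then st
  else if PySem.Str.isIn "-" (PySem.Str.strip part0) then
    match PySem.Str.split? (PySem.Str.strip part0) "-" with
    | some [a, b] =>
      match PySem.Int.ofStr? a, PySem.Int.ofStr? b with
      | some s, some e => (st.1, st.2 ++ [(s, e)])
      | _, _ => st
    | _ => st
  else
    match PySem.Int.ofStr? (PySem.Str.strip part0) with
    | some v => (PySem.Set.add st.1 v, st.2)
    | none => st

-- A's per-frame test: membership in desired_frames, else the linear scan of ranges (break = any)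
def pvAMatch (dr : PySem.Set Int × List (Int × Int)) (v : Int) : Bool :=
  if PySem.Set.contains dr.1 v then true
  else dr.2.any (fun r => decide (r.1 ≤ v) && decide (v ≤ r.2))

def parse_frames_py (frame_str : String) (available_frames : List Int) : List Int :=
  let fs := PySem.Str.strip (PySem.Str.lower frame_str)
  let max_idx : Int := (available_frames.length : Int)
  if fs = "*" ∨ fs = "all" then PySem.List.pyRange 0 max_idx 1
  else
    let parts := (PySem.Str.split? fs ",").getD []   -- sep "," ≠ "" so split? is always some
    let dr := parts.foldl pvAStep (PySem.Set.empty, [])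
    let final := (PySem.List.enumerate available_frames 0).foldl
      (fun acc p => if pvAMatch dr p.2 then acc ++ [p.1] else acc) []
    PySem.List.sorted final (fun x => x) false

-- ===== PORT B =====
-- one part of the comma-split string: every selector becomes an interval (v ↦ (v,v))
def pvBStep (acc : List (Int × Int)) (part0 : String) : List (Int × Int) :=
  if PySem.Str.strip part0 = "" then acc
  else if PySem.Str.isIn "-" (PySem.Str.strip part0) then
    match PySem.Str.split? (PySem.Str.strip part0) "-" with
    | some [a, b] =>
      match PySem.Int.ofStr? a, PySem.Int.ofStr? b with
      | some s, some e => acc ++ [(s, e)]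
      | _, _ => acc
    | _ => acc
  else
    match PySem.Int.ofStr? (PySem.Str.strip part0) with
    | some v => acc ++ [(v, v)]
    | none => acc

-- B's merge loop state: (merged list so far, current open interval)
def pvMergeStep (st : List (Int × Int) × Option (Int × Int)) (p : Int × Int) :
    List (Int × Int) × Option (Int × Int) :=
  match st.2 with
  | some c =>
    if p.1 ≤ c.2 then (st.1, some (if c.2 < p.2 then (c.1, p.2) else c))
    else (st.1 ++ [c], some p)
  | none => (st.1, some p)

-- the trailing 'if cur is not None: merged.append(cur)'
def pvFinishMerge (st : List (Int × Int) × Option (Int × Int)) : List (Int × Int) :=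
  match st.2 with
  | some c => st.1 ++ [c]
  | none => st.1

-- B's per-frame test: bisect.bisect_right on the merged starts, then one end comparison
def pvBMatch (merged : List (Int × Int)) (starts : List Int) (v : Int) : Bool :=
  let k := PySem.List.bisectRight starts v
  decide (0 < k) && decide (v ≤ (PySem.List.pyGetD merged ((k : Int) - 1) (0, 0)).2)

def parse_frames_py_alt (frame_str : String) (available_frames : List Int) : List Int :=
  let fs := PySem.Str.strip (PySem.Str.lower frame_str)
  if fs = "*" ∨ fs = "all" then PySem.List.pyRange 0 (available_frames.length : Int) 1
  else
    let intervals := ((PySem.Str.split? fs ",").getD []).foldl pvBStep []   -- sep "," ≠ ""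
    let sortedIv := PySem.List.sorted intervals (fun p => p.1) false        -- sort(key=first)
    let merged := pvFinishMerge (sortedIv.foldl pvMergeStep ([], none))
    let starts := merged.map (fun p => p.1)
    (PySem.List.enumerate available_frames 0).foldl
      (fun acc p => if pvBMatch merged starts p.2 then acc ++ [p.1] else acc) []

-- ===== PRECONDITION & SPEC =====
def Spec_parse_frames_py (frame_str : String) (available_frames : List Int) (out : List Int) : Prop := out = parse_frames_py_alt frame_str available_frames
instance (frame_str : String) (available_frames : List Int) (out : List Int) : Decidable (Spec_parse_frames_py frame_str available_frames out) := by unfold Spec_parse_frames_py; infer_instance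

-- ===== CLAIM (what is proved, stated in full; the proofs are below) =====
def Claim_equal_parse_frames_py : Prop := ∀ (frame_str : String) (available_frames : List Int), Dom_parse_frames_py frame_str available_frames → Spec_parse_frames_py frame_str available_frames (parse_frames_py frame_str available_frames)

-- ===== LEMMAS AND PROOFS =====

-- 'v is inside one of the intervals of l'
def pvCover (l : List (Int × Int)) (v : Int) : Prop := ∃ r ∈ l, r.1 ≤ v ∧ v ≤ r.2

-- the ordering invariant of the merged list: starts nondecreasing AND a gap between consecutive
-- intervals, packaged as one transitive relation
def pvR (p q : Int × Int) : Prop := p.1 ≤ q.1 ∧ p.2 < q.1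


theorem pvCover_append (l l' : List (Int × Int)) (v : Int) :
    pvCover (l ++ l') v ↔ pvCover l v ∨ pvCover l' v := by
  constructor
  · rintro ⟨r, hr, h1, h2⟩
    rcases List.mem_append.1 hr with h | h
    · exact Or.inl ⟨r, h, h1, h2⟩
    · exact Or.inr ⟨r, h, h1, h2⟩
  · rintro (⟨r, hr, h1, h2⟩ | ⟨r, hr, h1, h2⟩)
    · exact ⟨r, List.mem_append.2 (Or.inl hr), h1, h2⟩
    · exact ⟨r, List.mem_append.2 (Or.inr hr), h1, h2⟩

theorem pvCover_single (s e v : Int) : pvCover [(s, e)] v ↔ s ≤ v ∧ v ≤ e := by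
  simp [pvCover]

theorem pvCover_nil (v : Int) : ¬ pvCover [] v := by simp [pvCover]

theorem pvCover_pair (r : Int × Int) (v : Int) : pvCover [r] v ↔ r.1 ≤ v ∧ v ≤ r.2 := by
  simp [pvCover]

theorem pvCover_cons (r : Int × Int) (l : List (Int × Int)) (v : Int) :
    pvCover (r :: l) v ↔ (r.1 ≤ v ∧ v ≤ r.2) ∨ pvCover l v := by
  have h := pvCover_append [r] l v
  simp only [List.singleton_append] at h
  rw [h, pvCover_pair]

theorem pv_step_equiv (part : String) (d0 : PySem.Set Int) (r0 iv0 : List (Int × Int))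
    (h : ∀ v : Int, (v ∈ d0 ∨ pvCover r0 v) ↔ pvCover iv0 v) (w : Int) :
    ((w ∈ (pvAStep (d0, r0) part).1 ∨ pvCover (pvAStep (d0, r0) part).2 w)
      ↔ pvCover (pvBStep iv0 part) w) := by
  unfold pvAStep pvBStep
  split_ifs with h1 h2
  · exact h w
  · clear h1 h2
    rcases PySem.Str.split? (PySem.Str.strip part) "-" with _ | (_ | ⟨a, _ | ⟨b, _ | ⟨c, t⟩⟩⟩) <;>
      dsimp only
    · exact h w
    · exact h w
    · exact h w
    · rcases PySem.Int.ofStr? a with _ | s <;> rcases PySem.Int.ofStr? b with _ | e <;> dsimp only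
      · exact h w
      · exact h w
      · exact h w
      · simp only [pvCover_append, pvCover_single]
        have := h w
        tauto
    · exact h w
  · clear h1 h2
    rcases PySem.Int.ofStr? (PySem.Str.strip part) with _ | v <;> dsimp only
    · exact h w
    · simp only [pvCover_append, pvCover_single]
      have hm := PySem.Set.mem_add d0 v w
      have heq : w = v ↔ (v ≤ w ∧ w ≤ v) := by omega
      have := h w
      rw [hm, heq] at *
      tauto

-- A's parsed state and B's interval list select the same values (same parts, same tests)
theorem pv_parse_equiv (parts : List String) (d0 : PySem.Set Int) (r0 iv0 : List (Int × Int))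
    (h : ∀ v : Int, (v ∈ d0 ∨ pvCover r0 v) ↔ pvCover iv0 v) :
    ∀ v : Int, (v ∈ (parts.foldl pvAStep (d0, r0)).1 ∨ pvCover (parts.foldl pvAStep (d0, r0)).2 v)
      ↔ pvCover (parts.foldl pvBStep iv0) v := by
  induction parts generalizing d0 r0 iv0 with
  | nil => simpa using h
  | cons part rest ih =>
    intro v
    simp only [List.foldl_cons]
    have hst := pv_step_equiv part d0 r0 iv0 h
    have hpr : (pvAStep (d0, r0) part) = ((pvAStep (d0, r0) part).1, (pvAStep (d0, r0) part).2) := rfl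
    rw [hpr]
    exact ih _ _ _ hst v

-- the merge fold: preserves coverage and establishes the pvR chain
theorem pv_merge_inv (l : List (Int × Int)) :
    ∀ (done : List (Int × Int)) (cur : Option (Int × Int)),
    List.Pairwise (fun p q : Int × Int => p.1 ≤ q.1) l →
    (∀ p ∈ l, ∀ q ∈ pvFinishMerge (done, cur), q.1 ≤ p.1) →
    List.Pairwise pvR (pvFinishMerge (done, cur)) →
    (cur = none → done = []) →
    List.Pairwise pvR (pvFinishMerge (l.foldl pvMergeStep (done, cur))) ∧
    ∀ v : Int, pvCover (pvFinishMerge (l.foldl pvMergeStep (done, cur))) v ↔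
      pvCover (pvFinishMerge (done, cur)) v ∨ pvCover l v := by
  induction l with
  | nil =>
    intro done cur _ _ hR _
    refine ⟨hR, fun v => ?_⟩
    have := pvCover_nil v
    simp only [List.foldl_nil]
    tauto
  | cons p rest ih =>
    intro done cur hord hlo hR hnil
    simp only [List.foldl_cons]
    have hordr : List.Pairwise (fun p q : Int × Int => p.1 ≤ q.1) rest := hord.tail
    have hple : ∀ q ∈ rest, p.1 ≤ q.1 := fun q hq => List.rel_of_pairwise_cons hord hq
    rcases cur with _ | c
    · -- cur = None: start the first open interval
      have hd : done = [] := hnil rfl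
      subst hd
      have hstep : pvMergeStep ([], none) p = ([], some p) := rfl
      rw [hstep]
      have hfin : pvFinishMerge ([], some p) = [p] := rfl
      obtain ⟨ihR, ihC⟩ := ih [] (some p)
        hordr
        (by intro q hq x hx
            rw [hfin] at hx
            rcases List.mem_singleton.1 hx with rfl
            exact hple q hq)
        (by rw [hfin]; exact List.pairwise_singleton _ _)
        (by intro hc; cases hc)
      refine ⟨ihR, fun v => ?_⟩
      rw [ihC v, hfin]
      have h1 := pvCover_cons p rest v
      have h2 := pvCover_pair p v
      have h3 := pvCover_nil v
      tauto
    · -- cur = some c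
      have hcle : c.1 ≤ p.1 := by
        have := hlo p (List.mem_cons_self) c
        apply this
        simp [pvFinishMerge]
      by_cases hpc : p.1 ≤ c.2
      · -- merge into the open interval
        have hstep : pvMergeStep (done, some c) p
            = (done, some (if c.2 < p.2 then (c.1, p.2) else c)) := by
          simp [pvMergeStep, hpc]
        rw [hstep]
        set c' : Int × Int := if c.2 < p.2 then (c.1, p.2) else c with hc'
        have hc'1 : c'.1 = c.1 := by rw [hc']; split <;> rfl
        have hc'2 : c'.2 = max c.2 p.2 := by rw [hc']; split <;> simp <;> omega
        have hfin : pvFinishMerge (done, some c') = done ++ [c'] := rfl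
        have hfin0 : pvFinishMerge (done, some c) = done ++ [c] := rfl
        rw [hfin0] at hlo hR
        obtain ⟨ihR, ihC⟩ := ih done (some c')
          hordr
          (by intro q hq x hx
              rw [hfin] at hx
              rcases List.mem_append.1 hx with hx | hx
              · exact le_trans (hlo q (List.mem_cons_of_mem _ hq) x (List.mem_append.2 (Or.inl hx))) (le_refl _)
              · rcases List.mem_singleton.1 hx with rfl
                rw [hc'1]
                exact le_trans hcle (hple q hq))
          (by rw [hfin]
              rw [List.pairwise_append] at hR ⊢
              refine ⟨hR.1, List.pairwise_singleton _ _, ?_⟩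
              intro a ha b hb
              rcases List.mem_singleton.1 hb with rfl
              have := hR.2.2 a ha c (List.mem_singleton.2 rfl)
              unfold pvR at this ⊢
              rw [hc'1]
              exact this)
          (by intro hc; cases hc)
        refine ⟨ihR, fun v => ?_⟩
        rw [ihC v, hfin, hfin0]
        rw [pvCover_append, pvCover_append, pvCover_pair c' v, pvCover_pair c v,
            pvCover_cons]
        have hiff : (c'.1 ≤ v ∧ v ≤ c'.2) ↔ ((c.1 ≤ v ∧ v ≤ c.2) ∨ (p.1 ≤ v ∧ v ≤ p.2)) := by
          rw [hc'1, hc'2]; omega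
        tauto
      · -- close the open interval, start a new one
        have hstep : pvMergeStep (done, some c) p = (done ++ [c], some p) := by
          simp [pvMergeStep, hpc]
        rw [hstep]
        have hfin : pvFinishMerge (done ++ [c], some p) = (done ++ [c]) ++ [p] := rfl
        have hfin0 : pvFinishMerge (done, some c) = done ++ [c] := rfl
        rw [hfin0] at hlo hR
        have hgap : c.2 < p.1 := by omega
        obtain ⟨ihR, ihC⟩ := ih (done ++ [c]) (some p)
          hordr
          (by intro q hq x hx
              rw [hfin] at hx
              rcases List.mem_append.1 hx with hx | hx
              · exact le_trans (hlo q (List.mem_cons_of_mem _ hq) x hx) (le_refl _)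
              · rcases List.mem_singleton.1 hx with rfl
                exact hple q hq)
          (by rw [hfin]
              rw [List.pairwise_append]
              refine ⟨hR, List.pairwise_singleton _ _, ?_⟩
              intro a ha b hb
              have hb' : b = p := List.mem_singleton.1 hb
              rw [hb']
              constructor
              · exact hlo p (List.mem_cons_self) a ha
              · rcases List.mem_append.1 ha with ha' | ha'
                · have := (List.pairwise_append.1 hR).2.2 a ha' c (List.mem_singleton.2 rfl)
                  exact lt_of_lt_of_le this.2 hcle
                · rcases List.mem_singleton.1 ha' with rfl
                  exact hgap)
          (by intro hc; cases hc)
        refine ⟨ihR, fun v => ?_⟩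
        rw [ihC v, hfin, hfin0]
        rw [pvCover_append (done ++ [c]) [p], pvCover_pair p v, pvCover_cons p rest v]
        generalize pvCover (done ++ [c]) v = A
        generalize pvCover rest v = C
        generalize (p.1 ≤ v ∧ v ≤ p.2) = D
        tauto

-- binary-search lookup on a pvR-chained list decides coverage
theorem pv_lookup (merged : List (Int × Int)) (v : Int)
    (hR : List.Pairwise pvR merged) :
    pvBMatch merged (merged.map (fun p => p.1)) v = true ↔ pvCover merged v := by
  have hs : List.Pairwise (fun a b : Int => a ≤ b) (merged.map (fun p => p.1)) :=
    hR.map _ (fun a b hab => hab.1)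
  obtain ⟨hkle, hlt, hge⟩ := PySem.List.bisectRight_spec (merged.map (fun p => p.1)) v hs
  rw [List.length_map] at hkle
  unfold pvBMatch
  simp only [Bool.and_eq_true, decide_eq_true_eq]
  set k := PySem.List.bisectRight (merged.map (fun p => p.1)) v with hk
  have hget : ∀ h : 0 < k, PySem.List.pyGetD merged ((k : Int) - 1) (0, 0) = merged[k - 1]'(by omega) := by
    intro h
    have hcast : ((k : Int) - 1) = ((k - 1 : Nat) : Int) := by omega
    rw [hcast, PySem.List.pyGetD_natCast, List.getD_eq_getElem?_getD,
        List.getElem?_eq_getElem (by omega)]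
    rfl
  constructor
  · rintro ⟨hk0, hv⟩
    rw [hget hk0] at hv
    have hj : k - 1 < merged.length := by omega
    refine ⟨merged[k - 1], List.getElem_mem hj, ?_, hv⟩
    have := hlt (k - 1) (by simp only [List.length_map]; omega) (by omega)
    rw [List.getElem_map] at this
    exact this
  · rintro ⟨r, hr, h1, h2⟩
    obtain ⟨i, hi, hieq⟩ := List.getElem_of_mem hr
    have hik : i < k := by
      by_contra hcon
      have := hge i (by simp only [List.length_map]; omega) (by omega)
      rw [List.getElem_map, hieq] at this
      omega
    have hk0 : 0 < k := by omega
    refine ⟨hk0, ?_⟩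
    rw [hget hk0]
    rcases Nat.lt_or_ge i (k - 1) with hlt' | hge'
    · -- an earlier interval cannot reach v: gap to merged[k-1]
      have hR' := List.pairwise_iff_getElem.1 hR i (k - 1) (by omega) (by omega) hlt'
      have hst := hlt (k - 1) (by simp only [List.length_map]; omega) (by omega)
      rw [List.getElem_map] at hst
      rw [hieq] at hR'
      have : r.2 < merged[k - 1].1 := hR'.2
      omega
    · have : i = k - 1 := by omega
      subst this
      rw [hieq]
      exact h2

-- A's per-frame test in propositional form
theorem pvAMatch_iff (dr : PySem.Set Int × List (Int × Int)) (v : Int) :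
    pvAMatch dr v = true ↔ (v ∈ dr.1 ∨ pvCover dr.2 v) := by
  unfold pvAMatch
  split_ifs with h
  · simp only [true_iff]
    exact Or.inl ((PySem.Set.contains_iff _ _).1 h)
  · have hnm : ¬ v ∈ dr.1 := fun hm => h ((PySem.Set.contains_iff _ _).2 hm)
    simp only [List.any_eq_true, Bool.and_eq_true, decide_eq_true_eq]
    unfold pvCover
    tauto

theorem pvCover_perm {l l' : List (Int × Int)} (h : l.Perm l') (v : Int) :
    pvCover l v ↔ pvCover l' v := by
  unfold pvCover
  constructor
  · rintro ⟨r, hr, h1, h2⟩; exact ⟨r, h.mem_iff.1 hr, h1, h2⟩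
  · rintro ⟨r, hr, h1, h2⟩; exact ⟨r, h.mem_iff.2 hr, h1, h2⟩

-- the two per-frame tests agree for the states both ports build from the same parts
theorem pv_match_eq (parts : List String) (v : Int) :
    pvAMatch (parts.foldl pvAStep (PySem.Set.empty, [])) v
      = pvBMatch
          (pvFinishMerge ((PySem.List.sorted (parts.foldl pvBStep []) (fun p => p.1) false).foldl pvMergeStep ([], none)))
          ((pvFinishMerge ((PySem.List.sorted (parts.foldl pvBStep []) (fun p => p.1) false).foldl pvMergeStep ([], none))).map (fun p => p.1))
          v := by
  set dr := parts.foldl pvAStep (PySem.Set.empty, []) with hdr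
  set intervals := parts.foldl pvBStep [] with hiv
  set sortedIv := PySem.List.sorted intervals (fun p => p.1) false with hsi
  set merged := pvFinishMerge (sortedIv.foldl pvMergeStep ([], none)) with hm
  have h0 : ∀ w : Int, (w ∈ (PySem.Set.empty : PySem.Set Int) ∨ pvCover [] w) ↔ pvCover [] w := by
    intro w
    have : ¬ w ∈ (PySem.Set.empty : PySem.Set Int) := by simp [PySem.Set.empty]
    tauto
  have h1 : (v ∈ dr.1 ∨ pvCover dr.2 v) ↔ pvCover intervals v := by
    have := pv_parse_equiv parts PySem.Set.empty [] [] h0 v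
    rw [hdr, hiv]
    exact this
  have h2 : pvCover intervals v ↔ pvCover sortedIv v :=
    (pvCover_perm (PySem.List.sorted_perm intervals (fun p => p.1) false) v).symm
  have hord : List.Pairwise (fun p q : Int × Int => p.1 ≤ q.1) sortedIv :=
    PySem.List.sorted_pairwise intervals (fun p => p.1)
  obtain ⟨hRm, hCm⟩ := pv_merge_inv sortedIv [] none hord
    (by intro p _ q hq; cases hq) (List.Pairwise.nil) (fun _ => rfl)
  have h3 : pvCover merged v ↔ pvCover sortedIv v := by
    rw [hm, hCm v]
    have : ¬ pvCover (pvFinishMerge ([], none)) v := pvCover_nil v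
    tauto
  have h4 := pv_lookup merged v hRm
  rw [Bool.eq_iff_iff, pvAMatch_iff, h4, h1, h2, h3]

-- ===== VERDICT (by name: the statement is the Claim_ definition above) =====
theorem parse_frames_py_spec : Claim_equal_parse_frames_py := by
  unfold Claim_equal_parse_frames_py Spec_parse_frames_py
  intro fs0 frames _
  by_cases hstar : (PySem.Str.strip (PySem.Str.lower fs0) = "*" ∨ PySem.Str.strip (PySem.Str.lower fs0) = "all")
  · simp only [parse_frames_py, parse_frames_py_alt, if_pos hstar]
  · simp only [parse_frames_py, parse_frames_py_alt, if_neg hstar]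
    set parts := (PySem.Str.split? (PySem.Str.strip (PySem.Str.lower fs0)) ",").getD [] with hparts
    set dr := parts.foldl pvAStep (PySem.Set.empty, []) with hdr
    set merged := pvFinishMerge ((PySem.List.sorted (parts.foldl pvBStep []) (fun p => p.1) false).foldl pvMergeStep ([], none)) with hm
    rw [PySem.List.foldl_append_if (fun p : Int × Int => pvAMatch dr p.2) (fun p : Int × Int => p.1)
          (PySem.List.enumerate frames 0) [],
        PySem.List.foldl_append_if (fun p : Int × Int => pvBMatch merged (merged.map (fun p => p.1)) p.2)
          (fun p : Int × Int => p.1) (PySem.List.enumerate frames 0) []]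
    have hfc : List.filter (fun p : Int × Int => pvAMatch dr p.2) (PySem.List.enumerate frames 0)
        = List.filter (fun p : Int × Int => pvBMatch merged (merged.map (fun p => p.1)) p.2)
            (PySem.List.enumerate frames 0) := by
      apply List.filter_congr
      intro x _
      rw [hdr, hm]
      exact pv_match_eq parts x.2
    rw [hfc]
    apply PySem.List.sorted_eq_self_of_pairwise
    have hpw := (PySem.List.pairwise_lt_enumerate frames 0).filter
      (fun p : Int × Int => pvBMatch merged (merged.map (fun p => p.1)) p.2)
    have := hpw.map (fun p : Int × Int => p.1)
      (fun a b (h : a.1 < b.1) => le_of_lt h)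
    simpa using this
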